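-- pv_equiv track=rewrite | github.com/tothemooooon/mathor_cup | src/mathorcup_a/q2.py | _split_seed_budget
-- ===== SOURCE A (Python) =====
-- def _split_seed_budget(total: int, n_parts: int) -> list[int]:
--     total = max(0, int(total))
--     n_parts = max(1, int(n_parts))
--     if total == 0:
--         return [0] * n_parts
--     base = total // n_parts
--     rem = total % n_parts
--     out = [base] * n_parts
--     for i in range(rem):
--         out[i] += 1
--     return out
-- ===== SOURCE B (Python) =====
-- def _split_seed_budget(total: int, n_parts: int) -> list[int]:
--     total = max(0, int(total))
--     n_parts = max(1, int(n_parts))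
--     return [(total + n_parts - 1 - i) // n_parts for i in range(n_parts)]
-- ===== Notes on version B (the rewrite author's own statement) =====
-- stated objective: simpler
-- what changed: Replaced the base/remainder fill plus in-place increment loop by a single per-index closed form (total + n_parts - 1 - i) // n_parts, which also subsumes the total == 0 special case.
import Mathlib
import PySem

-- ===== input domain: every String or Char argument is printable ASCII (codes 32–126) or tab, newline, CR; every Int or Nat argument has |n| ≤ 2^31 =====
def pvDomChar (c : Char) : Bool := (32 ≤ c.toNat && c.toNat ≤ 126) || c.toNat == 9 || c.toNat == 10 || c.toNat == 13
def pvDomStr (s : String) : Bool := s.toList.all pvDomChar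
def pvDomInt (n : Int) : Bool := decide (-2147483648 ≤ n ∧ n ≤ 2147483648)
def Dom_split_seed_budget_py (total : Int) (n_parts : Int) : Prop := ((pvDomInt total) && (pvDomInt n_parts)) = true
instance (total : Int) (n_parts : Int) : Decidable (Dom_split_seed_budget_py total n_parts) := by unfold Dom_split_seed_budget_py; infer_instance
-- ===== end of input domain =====

-- B replaces A's base/remainder fill + increment loop by a per-index closed form; objective: simpler.

-- ===== PORT A =====
-- literal transliteration of _split_seed_budget: guards, zero shortcut, replicate fill, then
-- the `for i in range(rem): out[i] += 1` loop as a foldl that sets index i (a range index is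
-- always ≥ 0 and < len(out) here, so .toNat and List.set are exact for Python's out[i] += 1)
def split_seed_budget_py (total : Int) (n_parts : Int) : List Int :=
  let total := max 0 total
  let n_parts := max 1 n_parts
  if total = 0 then List.replicate n_parts.toNat 0
  else
    let base := PySem.Int.floordiv total n_parts
    let rem := PySem.Int.mod total n_parts
    let out := List.replicate n_parts.toNat base
    (PySem.List.pyRange 0 rem 1).foldl
      (fun out i => out.set i.toNat (out.getD i.toNat 0 + 1)) out

-- ===== PORT B =====
def split_seed_budget_py_alt (total : Int) (n_parts : Int) : List Int :=
  let total := max 0 total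
  let n_parts := max 1 n_parts
  (PySem.List.pyRange 0 n_parts 1).map
    (fun i => PySem.Int.floordiv (total + n_parts - 1 - i) n_parts)

-- ===== PRECONDITION & SPEC =====
def Spec_split_seed_budget_py (total : Int) (n_parts : Int) (out : List Int) : Prop := out = split_seed_budget_py_alt total n_parts
instance (total : Int) (n_parts : Int) (out : List Int) : Decidable (Spec_split_seed_budget_py total n_parts out) := by unfold Spec_split_seed_budget_py; infer_instance

-- ===== CLAIM (what is proved, stated in full; the proofs are below) =====
def Claim_equal_split_seed_budget_py : Prop := ∀ (total : Int) (n_parts : Int), Dom_split_seed_budget_py total n_parts → Spec_split_seed_budget_py total n_parts (split_seed_budget_py total n_parts)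

-- ===== LEMMAS AND PROOFS =====

-- the Nat-indexed increment step of A's loop
def pvInc (out : List Int) (i : Nat) : List Int := out.set i (out.getD i 0 + 1)

theorem pvLoop_length (k : Nat) (xs : List Int) :
    ((List.range k).foldl pvInc xs).length = xs.length := by
  induction k generalizing xs with
  | zero => simp
  | succ k ih => rw [List.range_succ, List.foldl_append]; simp [pvInc, ih]

theorem pvLoop_getElem? (k : Nat) (xs : List Int) (hk : k ≤ xs.length) (j : Nat) :
    ((List.range k).foldl pvInc xs)[j]? =
      if j < k then xs[j]?.map (· + 1) else xs[j]? := by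
  induction k generalizing j with
  | zero => simp
  | succ k ih =>
    rw [List.range_succ, List.foldl_append]
    simp only [List.foldl_cons, List.foldl_nil]
    have hk' : k ≤ xs.length := Nat.le_of_succ_le hk
    have hlen : ((List.range k).foldl pvInc xs).length = xs.length := pvLoop_length k xs
    rw [pvInc, List.getElem?_set]
    by_cases hjk : k = j
    · rw [if_pos hjk]; subst hjk
      have h1 := ih hk' k
      rw [if_neg (lt_irrefl k)] at h1
      have hk2 : k < xs.length := hk
      rw [if_pos (by omega), if_pos (Nat.lt_succ_self k),
        List.getD_eq_getElem?_getD, h1, List.getElem?_eq_getElem hk2]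
      simp
    · rw [if_neg hjk, ih hk' j]
      by_cases hlt : j < k
      · rw [if_pos hlt, if_pos (Nat.lt_succ_of_lt hlt)]
      · rw [if_neg hlt, if_neg (by omega)]

theorem pvRange_int_foldl (m : Int) (_hm : 0 ≤ m) (xs : List Int) :
    (PySem.List.pyRange 0 m 1).foldl
        (fun out i => out.set i.toNat (out.getD i.toNat 0 + 1)) xs =
      (List.range m.toNat).foldl pvInc xs := by
  rw [PySem.List.pyRange_one]
  simp only [sub_zero, List.foldl_map]
  apply PySem.List.foldl_congr_mem
  intro out i _
  have h : (0 + (i : Int)).toNat = i := by omega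
  rw [pvInc, h]

theorem pvCore (t n : Int) (ht0 : 0 ≤ t) (hn0 : 0 < n) :
    (if t = 0 then List.replicate n.toNat 0
     else (PySem.List.pyRange 0 (PySem.Int.mod t n) 1).foldl
        (fun out i => out.set i.toNat (out.getD i.toNat 0 + 1))
        (List.replicate n.toNat (PySem.Int.floordiv t n)))
    = (PySem.List.pyRange 0 n 1).map
        (fun i => PySem.Int.floordiv (t + n - 1 - i) n) := by
  by_cases h0 : t = 0
  · subst h0
    rw [if_pos rfl]
    apply List.ext_getElem?
    intro j
    by_cases hj : j < n.toNat
    · rw [List.getElem?_map, PySem.List.getElem?_pyRange_one,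
        if_pos (by omega : j < (n - 0).toNat), List.getElem?_replicate, if_pos hj]
      simp only [Option.map_some, zero_add]
      congr 1
      have hj2 : (j:Int) < n := by omega
      rw [eq_comm, PySem.Int.floordiv_eq_iff_of_pos hn0]
      constructor <;> linarith
    · rw [List.getElem?_replicate, if_neg hj, eq_comm, List.getElem?_eq_none]
      rw [List.length_map, PySem.List.length_pyRange_one]
      omega
  · rw [if_neg h0]
    have hbm := PySem.Int.floordiv_mul_add_mod t n
    have hr0 : 0 ≤ PySem.Int.mod t n := by
      rw [PySem.Int.mod_eq_emod_of_pos hn0]; exact Int.emod_nonneg t (by omega)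
    have hrn : PySem.Int.mod t n < n := by
      rw [PySem.Int.mod_eq_emod_of_pos hn0]; exact Int.emod_lt_of_pos t hn0
    rw [pvRange_int_foldl _ hr0]
    apply List.ext_getElem?
    intro j
    rw [pvLoop_getElem? _ _ (by rw [List.length_replicate]; omega) j]
    by_cases hj : j < n.toNat
    · rw [List.getElem?_map, PySem.List.getElem?_pyRange_one,
        if_pos (by omega : j < (n - 0).toNat), List.getElem?_replicate, if_pos hj]
      simp only [Option.map_some, zero_add]
      have hj1 : (0:Int) ≤ (j:Int) := by omega
      have hj2 : (j:Int) < n := by omega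
      have hcf : PySem.Int.floordiv (t + n - 1 - (j:Int)) n =
          PySem.Int.floordiv t n + (if (j:Int) < PySem.Int.mod t n then 1 else 0) := by
        rw [PySem.Int.floordiv_eq_iff_of_pos hn0]
        split_ifs with h <;> constructor <;> nlinarith [hbm]
      rw [hcf]
      by_cases hlt : j < (PySem.Int.mod t n).toNat
      · rw [if_pos hlt, if_pos (by omega : (j:Int) < PySem.Int.mod t n)]
      · rw [if_neg hlt, if_neg (by omega : ¬ (j:Int) < PySem.Int.mod t n)]
        simp
    · rw [List.getElem?_replicate, if_neg hj, eq_comm, List.getElem?_eq_none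
        (by rw [List.length_map, PySem.List.length_pyRange_one]; omega)]
      split_ifs <;> rfl

theorem split_seed_budget_py_eq (total n_parts : Int) :
    split_seed_budget_py total n_parts = split_seed_budget_py_alt total n_parts := by
  unfold split_seed_budget_py split_seed_budget_py_alt
  exact pvCore (max 0 total) (max 1 n_parts) (le_max_left 0 total)
    (lt_of_lt_of_le one_pos (le_max_left 1 n_parts))

-- ===== VERDICT (by name: the statement is the Claim_ definition above) =====
theorem split_seed_budget_py_spec : Claim_equal_split_seed_budget_py := by
  intro total n_parts _
  unfold Spec_split_seed_budget_py
  exact split_seed_budget_py_eq total n_parts
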